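-- pv_equiv track=rewrite | github.com/shhuan1989/algorithms | luogu/p1034.py | dfs
-- ===== SOURCE A (Python) =====
-- def dfs(k, xs, xy, segs):
--     if k == 0:
--         if not xs:
--             return [segs]
--         return []
--     if not xs:
--         return []
--
--     ans = []
--     miny, maxy = min(xy[xs[0]]), max(xy[xs[0]])
--     for i in range(len(xs)):
--         miny = min(miny, min(xy[xs[i]]))
--         maxy = max(maxy, max(xy[xs[i]]))
--         ans += dfs(k-1, xs[i+1:], xy, segs+[(xs[0], xs[i], miny, maxy)])
--
--     return ans
-- ===== SOURCE B (Python) =====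
-- def dfs(k, xs, xy, segs):
--     # two-phase: precompute per-point min/max tables, enumerate segment-length
--     # compositions, then render each partition by slicing
--     if k == 0:
--         return [segs] if not xs else []
--     if not xs:
--         return []
--     lo = {e: min(xy[e]) for e in xs}
--     hi = {e: max(xy[e]) for e in xs}
--     return [segs + _render(xs, lo, hi, parts) for parts in _compositions(k, len(xs))]
--
-- def _compositions(k, n):
--     # all lists of k positive ints summing to n, in lexicographic order
--     if k == 0:
--         return [[]] if n == 0 else []
--     if n == 0:
--         return []
--     return [[first] + rest
--             for first in range(1, n + 1)
--             for rest in _compositions(k - 1, n - first)]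
--
-- def _render(xs, lo, hi, parts):
--     if not parts:
--         return []
--     p = parts[0]
--     seg = xs[:p]
--     return [(seg[0], seg[-1],
--              min(lo[e] for e in seg),
--              max(hi[e] for e in seg))] + _render(xs[p:], lo, hi, parts[1:])
-- ===== Notes on version B (the rewrite author's own statement) =====
-- stated objective: alternative
-- what changed: Replaces A's fused DFS (which threads segs and running min/max accumulators through the recursion) by a two-phase plan: enumerate the compositions of len(xs) into k positive segment lengths in lexicographic order, then render each composition by slicing xs and scanning each segment afresh for its min/max.
import Mathlib
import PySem

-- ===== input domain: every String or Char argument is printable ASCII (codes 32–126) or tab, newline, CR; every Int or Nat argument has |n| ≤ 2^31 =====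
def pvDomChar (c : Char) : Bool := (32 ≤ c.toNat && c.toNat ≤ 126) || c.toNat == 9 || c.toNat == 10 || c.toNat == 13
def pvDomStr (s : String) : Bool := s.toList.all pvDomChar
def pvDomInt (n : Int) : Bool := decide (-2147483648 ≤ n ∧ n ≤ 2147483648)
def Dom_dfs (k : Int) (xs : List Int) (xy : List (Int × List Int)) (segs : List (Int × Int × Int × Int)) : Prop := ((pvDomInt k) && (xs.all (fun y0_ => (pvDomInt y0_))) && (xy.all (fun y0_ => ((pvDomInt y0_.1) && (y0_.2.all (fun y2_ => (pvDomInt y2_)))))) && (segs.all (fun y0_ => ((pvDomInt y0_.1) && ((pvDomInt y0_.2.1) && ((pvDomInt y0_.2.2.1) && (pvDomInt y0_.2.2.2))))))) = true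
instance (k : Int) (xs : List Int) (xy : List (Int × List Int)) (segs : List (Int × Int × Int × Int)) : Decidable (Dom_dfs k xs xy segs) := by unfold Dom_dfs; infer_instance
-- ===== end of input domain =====

-- B replaces A's fused DFS (which threads segs and running min/max through the recursion) by a
-- two-phase plan: enumerate the segment-length compositions of len(xs) into k positive parts in
-- lexicographic order, then render each composition by slicing and scanning each segment afresh
-- (objective: alternative decomposition, same asymptotic cost).

-- shared lookup primitives: xy[e] (first match in the assoc list), min(xy[e]), max(xy[e])
def yvals (xy : List (Int × List Int)) (e : Int) : List Int :=
  ((PySem.Dict.mk xy).get? e).getD []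
def ymin (xy : List (Int × List Int)) (e : Int) : Int :=
  (PySem.List.min? (yvals xy e) (fun y => y)).getD 0
def ymax (xy : List (Int × List Int)) (e : Int) : Int :=
  (PySem.List.max? (yvals xy e) (fun y => y)).getD 0

-- ===== PORT A =====
mutual
-- the 'for i in range(len(xs))' loop of A, with its accumulators miny, maxy, ans
def dfsLoop (k : Int) (xs : List Int) (xy : List (Int × List Int)) (segs : List (Int × Int × Int × Int))
    (i : Nat) (miny maxy : Int) (ans : List (List (Int × Int × Int × Int))) :
    List (List (Int × Int × Int × Int)) :=
  if h : i < xs.length then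
    let miny' := min miny (ymin xy (xs.getD i 0))
    let maxy' := max maxy (ymax xy (xs.getD i 0))
    dfsLoop k xs xy segs (i+1) miny' maxy'
      (ans ++ dfs (k-1) (xs.drop (i+1)) xy (segs ++ [(xs.headD 0, xs.getD i 0, miny', maxy')]))
  else ans
termination_by (xs.length, 0, xs.length + 1 - i)

def dfs (k : Int) (xs : List Int) (xy : List (Int × List Int)) (segs : List (Int × Int × Int × Int)) :
    List (List (Int × Int × Int × Int)) :=
  if k = 0 then (if xs = [] then [segs] else [])
  else if xs = [] then []
  else dfsLoop k xs xy segs 0 (ymin xy (xs.headD 0)) (ymax xy (xs.headD 0)) []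
termination_by (xs.length, 1, 0)
end

-- ===== PORT B =====
-- all lists of k positive ints summing to n, in lexicographic order ('_compositions' in Source B)
def compositions (k : Int) (n : Nat) : List (List Nat) :=
  if k = 0 then (if n = 0 then [[]] else [])
  else if n = 0 then []
  else (List.range' 1 n).attach.flatMap (fun first =>
        (compositions (k - 1) (n - first.1)).map (fun rest => first.1 :: rest))
termination_by n
decreasing_by
  have := List.mem_range'_1.mp first.2; omega

-- '_render' in Source B: slice off the first segment, scan its table entries, recurse on the rest
def render (xs : List Int) (lo hi : PySem.Dict Int Int) (parts : List Nat) :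
    List (Int × Int × Int × Int) :=
  match parts with
  | [] => []
  | p :: rest =>
    let seg := xs.take p     -- xs[:p] (p ≥ 0 here, so the slice is 'take')
    (seg.headD 0, seg.getLastD 0,   -- seg[0], seg[-1]; seg is nonempty for every generated parts
     (PySem.List.min? (seg.map (fun e => lo.getD e 0)) (fun y => y)).getD 0,   -- lo[e]: never missing, seg ⊆ xs
     (PySem.List.max? (seg.map (fun e => hi.getD e 0)) (fun y => y)).getD 0) :: render (xs.drop p) lo hi rest

def dfs_alt (k : Int) (xs : List Int) (xy : List (Int × List Int)) (segs : List (Int × Int × Int × Int)) :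
    List (List (Int × Int × Int × Int)) :=
  if k = 0 then (if xs = [] then [segs] else [])
  else if xs = [] then []
  else
    let lo := xs.foldl (fun d e => d.insert e (ymin xy e)) PySem.Dict.empty   -- {e: min(xy[e]) for e in xs}
    let hi := xs.foldl (fun d e => d.insert e (ymax xy e)) PySem.Dict.empty   -- {e: max(xy[e]) for e in xs}
    (compositions k xs.length).map (fun parts => segs ++ render xs lo hi parts)

-- ===== PRECONDITION & SPEC =====
-- Pre_ excludes exactly the inputs where Python A raises: k ≠ 0 and xs nonempty while some
-- element of xs is missing from xy (KeyError) or maps to an empty list (ValueError on min/max).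
def Pre_dfs (k : Int) (xs : List Int) (xy : List (Int × List Int)) (segs : List (Int × Int × Int × Int)) : Prop :=
  k = 0 ∨ xs = [] ∨ ∀ e ∈ xs, yvals xy e ≠ []
instance (k : Int) (xs : List Int) (xy : List (Int × List Int)) (segs : List (Int × Int × Int × Int)) : Decidable (Pre_dfs k xs xy segs) := by unfold Pre_dfs; infer_instance
def pvWitness_dfs : Int × List Int × (List (Int × List Int)) × (List (Int × Int × Int × Int)) :=
  (2, [0, 1, 2], [(0, [3, 1]), (1, [5]), (2, [2, 4])], [])
def Spec_dfs (k : Int) (xs : List Int) (xy : List (Int × List Int)) (segs : List (Int × Int × Int × Int)) (out : List (List (Int × Int × Int × Int))) : Prop := out = dfs_alt k xs xy segs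
instance (k : Int) (xs : List Int) (xy : List (Int × List Int)) (segs : List (Int × Int × Int × Int)) (out : List (List (Int × Int × Int × Int))) : Decidable (Spec_dfs k xs xy segs out) := by unfold Spec_dfs; infer_instance

-- ===== CLAIM (what is proved, stated in full; the proofs are below) =====
def Claim_equal_dfs : Prop := ∀ (k : Int) (xs : List Int) (xy : List (Int × List Int)) (segs : List (Int × Int × Int × Int)), Dom_dfs k xs xy segs → Pre_dfs k xs xy segs → Spec_dfs k xs xy segs (dfs k xs xy segs)

-- ===== LEMMAS AND PROOFS =====

-- proof-side version of render with the table lookups replaced by direct min(xy[e])/max(xy[e])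
def renderY (xs : List Int) (xy : List (Int × List Int)) (parts : List Nat) :
    List (Int × Int × Int × Int) :=
  match parts with
  | [] => []
  | p :: rest =>
    let seg := xs.take p
    (seg.headD 0, seg.getLastD 0,
     (PySem.List.min? (seg.map (ymin xy)) (fun y => y)).getD 0,
     (PySem.List.max? (seg.map (ymax xy)) (fun y => y)).getD 0) :: renderY (xs.drop p) xy rest

theorem flatMap_attach_val {α β : Type} (l : List α) (g : α → List β) :
    l.attach.flatMap (fun x => g x.1) = l.flatMap g := by
  conv_rhs => rw [← List.attach_map_subtype_val l]
  rw [List.flatMap_map]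

theorem getD_tbl_not_mem (v : Int → Int) :
    ∀ (l : List Int) (d : PySem.Dict Int Int) (e : Int), e ∉ l →
      (l.foldl (fun d x => d.insert x (v x)) d).getD e 0 = d.getD e 0 := by
  intro l
  induction l with
  | nil => intro d e _; rfl
  | cons a t ih =>
    intro d e he
    have hne : e ≠ a := by intro h; subst h; exact he List.mem_cons_self
    rw [List.foldl_cons, ih _ e (fun h => he (List.mem_cons_of_mem a h)),
        PySem.Dict.getD_insert_of_ne d (v a) 0 hne]

theorem getD_tbl_mem (v : Int → Int) :
    ∀ (l : List Int) (d : PySem.Dict Int Int) (e : Int), e ∈ l →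
      (l.foldl (fun d x => d.insert x (v x)) d).getD e 0 = v e := by
  intro l
  induction l with
  | nil => intro d e he; simp at he
  | cons a t ih =>
    intro d e he
    rw [List.foldl_cons]
    by_cases het : e ∈ t
    · exact ih _ e het
    · have hea : e = a := by
        rcases List.mem_cons.mp he with h | h
        · exact h
        · exact absurd h het
      subst hea
      rw [getD_tbl_not_mem v t _ e het, PySem.Dict.getD_insert_self _ e (v e) 0]

theorem render_eq_renderY (xy : List (Int × List Int)) (lo hi : PySem.Dict Int Int)
    (E : List Int) (hlo : ∀ e ∈ E, lo.getD e 0 = ymin xy e)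
    (hhi : ∀ e ∈ E, hi.getD e 0 = ymax xy e) :
    ∀ (parts : List Nat) (xs' : List Int), (∀ e ∈ xs', e ∈ E) →
      render xs' lo hi parts = renderY xs' xy parts := by
  intro parts
  induction parts with
  | nil => intro xs' _; rfl
  | cons p rest ih =>
    intro xs' hsub
    rw [render, renderY]
    have h1 : (xs'.take p).map (fun e => lo.getD e 0) = (xs'.take p).map (ymin xy) :=
      List.map_congr_left (fun e he => hlo e (hsub e (List.mem_of_mem_take he)))
    have h2 : (xs'.take p).map (fun e => hi.getD e 0) = (xs'.take p).map (ymax xy) :=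
      List.map_congr_left (fun e he => hhi e (hsub e (List.mem_of_mem_take he)))
    rw [h1, h2, ih _ (fun e he => hsub e (List.mem_of_mem_drop he))]

-- dfs_alt, characterised through renderY
theorem alt_char (xy : List (Int × List Int)) (k : Int) (xs : List Int)
    (segs : List (Int × Int × Int × Int)) :
    dfs_alt k xs xy segs
      = (compositions k xs.length).map (fun parts => segs ++ renderY xs xy parts) := by
  by_cases hk : k = 0
  · subst hk
    by_cases hx : xs = []
    · subst hx; simp [dfs_alt, compositions, renderY]
    · have hlen : xs.length ≠ 0 := by simpa [List.length_eq_zero_iff] using hx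
      simp [dfs_alt, compositions, hx, hlen]
  · by_cases hx : xs = []
    · subst hx; simp [dfs_alt, compositions, hk]
    · simp only [dfs_alt, if_neg hk, if_neg hx]
      apply List.map_congr_left
      intro parts _
      apply congrArg
      refine render_eq_renderY xy _ _ xs ?_ ?_ parts xs (fun e he => he)
      · exact fun e he => getD_tbl_mem (ymin xy) xs PySem.Dict.empty e he
      · exact fun e he => getD_tbl_mem (ymax xy) xs PySem.Dict.empty e he

theorem getLastD_take (xs : List Int) (f : Nat) (hf : f < xs.length) :
    (xs.take (f+1)).getLastD 0 = xs.getD f 0 := by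
  have h1 : (xs.take (f+1)).length = f+1 := by rw [List.length_take]; omega
  rw [List.getLastD_eq_getLast?, List.getLast?_eq_getElem?, h1]
  simp only [Nat.add_sub_cancel]
  rw [List.getElem?_take_of_lt (by omega), List.getD_eq_getElem?_getD]

-- the rendered head tuple of a composition equals A's accumulated tuple, at i = 0
theorem tuple_eq (xy : List (Int × List Int)) (xs : List Int) (first : Nat)
    (h1 : 1 ≤ first) (h2 : first ≤ xs.length) (hx : xs ≠ []) :
    ((xs.take first).headD 0, (xs.take first).getLastD 0,
     (PySem.List.min? ((xs.take first).map (ymin xy)) (fun y => y)).getD 0,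
     (PySem.List.max? ((xs.take first).map (ymax xy)) (fun y => y)).getD 0)
    = (xs.headD 0, xs.getD (first-1) 0,
       List.foldl min (ymin xy (xs.headD 0)) ((xs.take first).map (ymin xy)),
       List.foldl max (ymax xy (xs.headD 0)) ((xs.take first).map (ymax xy))) := by
  obtain ⟨x, t, rfl⟩ : ∃ x t, xs = x :: t := by
    cases xs with | nil => simp at hx | cons a b => exact ⟨a, b, rfl⟩
  obtain ⟨f, rfl⟩ : ∃ f, first = f + 1 := ⟨first - 1, by omega⟩
  simp only [List.take_succ_cons, List.headD_cons]
  refine Prod.ext rfl (Prod.ext ?_ (Prod.ext ?_ ?_)) <;> simp only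
  · exact getLastD_take (x :: t) f (by simpa using h2)
  · rw [List.map_cons, PySem.List.min?_id_cons]
    simp
  · rw [List.map_cons, PySem.List.max?_id_cons]
    simp

theorem dfsLoop_eq (xy : List (Int × List Int)) (k : Int) (xs : List Int)
    (segs : List (Int × Int × Int × Int))
    (IH : ∀ ys : List Int, ys.length < xs.length → ∀ (k' : Int) segs',
        dfs k' ys xy segs'
          = (compositions k' ys.length).map (fun parts => segs' ++ renderY ys xy parts)) :
    ∀ (cnt i : Nat), i + cnt = xs.length → ∀ (miny maxy : Int)
      (ans : List (List (Int × Int × Int × Int))),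
      dfsLoop k xs xy segs i miny maxy ans
      = ans ++ (List.range' (i+1) cnt).flatMap (fun first =>
          (compositions (k-1) (xs.length - first)).map (fun rest =>
            segs ++ (xs.headD 0, xs.getD (first-1) 0,
                     List.foldl min miny (((xs.drop i).take (first - i)).map (ymin xy)),
                     List.foldl max maxy (((xs.drop i).take (first - i)).map (ymax xy)))
              :: renderY (xs.drop first) xy rest)) := by
  intro cnt
  induction cnt with
  | zero =>
    intro i hi miny maxy ans
    rw [dfsLoop]
    simp [show ¬ i < xs.length by omega]
  | succ c ihc =>
    intro i hi miny maxy ans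
    have hlt : i < xs.length := by omega
    rw [dfsLoop]
    simp only [dif_pos hlt]
    rw [ihc (i+1) (by omega)]
    rw [IH (xs.drop (i+1)) (by rw [List.length_drop]; omega)]
    have hdrop : xs.drop i = xs[i] :: xs.drop (i+1) := List.drop_eq_getElem_cons hlt
    have hgetD : xs.getD i 0 = xs[i] := List.getD_eq_getElem xs 0 hlt
    rw [List.range'_succ, List.flatMap_cons, List.append_assoc]
    congr 1
    congr 1
    · -- the freshly emitted block equals the head of the flatMap
      rw [List.length_drop]
      apply List.map_congr_left
      intro rest _
      have e1 : i + 1 - 1 = i := by omega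
      have e2 : i + 1 - i = 1 := by omega
      rw [e1, e2, hdrop]
      have ht : List.take 1 (xs[i] :: List.drop (i+1) xs) = [xs[i]] := rfl
      rw [ht, List.map_cons, List.map_nil, List.map_cons, List.map_nil,
          List.foldl_cons, List.foldl_nil, List.foldl_cons, List.foldl_nil,
          List.append_assoc, List.singleton_append, hgetD]
    · -- the remaining iterations agree: pull xs[i] out of the accumulated fold
      rw [List.flatMap_def, List.flatMap_def]
      apply congrArg
      apply List.map_congr_left
      intro first hf
      have hf' := List.mem_range'_1.mp hf
      apply List.map_congr_left
      intro rest _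
      have e3 : first - i = (first - (i+1)) + 1 := by omega
      rw [e3, hdrop, List.take_succ_cons, List.map_cons, List.map_cons,
          List.foldl_cons, List.foldl_cons, hgetD]

theorem dfs_eq_alt (xy : List (Int × List Int)) :
    ∀ (xs : List Int) (k : Int) (segs : List (Int × Int × Int × Int)),
      dfs k xs xy segs = dfs_alt k xs xy segs := by
  suffices H : ∀ (n : Nat) (xs : List Int), xs.length = n →
      ∀ (k : Int) (segs : List (Int × Int × Int × Int)),
        dfs k xs xy segs
          = (compositions k xs.length).map (fun parts => segs ++ renderY xs xy parts) by
    intro xs k segs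
    rw [alt_char, H xs.length xs rfl k segs]
  intro n
  induction n using Nat.strong_induction_on with
  | _ n IHn =>
    intro xs hxs k segs
    by_cases hk : k = 0
    · subst hk
      by_cases hx : xs = []
      · subst hx; rw [dfs]; simp [compositions, renderY]
      · rw [dfs]
        have hlen : xs.length ≠ 0 := by simpa [List.length_eq_zero_iff] using hx
        simp [compositions, hx, hlen]
    · by_cases hx : xs = []
      · subst hx; rw [dfs]; simp [compositions, hk]
      · rw [dfs]
        simp only [if_neg hk, if_neg hx]
        have IH : ∀ ys : List Int, ys.length < xs.length → ∀ (k' : Int) segs',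
            dfs k' ys xy segs'
              = (compositions k' ys.length).map (fun parts => segs' ++ renderY ys xy parts) := by
          intro ys hlen k' segs'
          exact IHn ys.length (by omega) ys rfl k' segs'
        rw [dfsLoop_eq xy k xs segs IH xs.length 0 (by omega)]
        rw [compositions]
        have hlen : ¬ xs.length = 0 := by simpa [List.length_eq_zero_iff] using hx
        simp only [if_neg hk, if_neg hlen]
        rw [List.map_flatMap]
        simp only [List.map_map, Function.comp_def]
        rw [flatMap_attach_val (List.range' 1 xs.length)
              (fun first => (compositions (k - 1) (xs.length - first)).map
                (fun rest => segs ++ renderY xs xy (first :: rest)))]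
        rw [List.nil_append, List.flatMap_def, List.flatMap_def]
        simp only [Nat.zero_add]
        apply congrArg
        apply List.map_congr_left
        intro first hf
        have hf' := List.mem_range'_1.mp hf
        apply List.map_congr_left
        intro rest _
        rw [renderY]
        simp only [List.drop_zero, Nat.sub_zero]
        rw [tuple_eq xy xs first (by omega) (by omega) hx]

-- ===== VERDICT (by name: the statement is the Claim_ definition above) =====
theorem dfs_spec : Claim_equal_dfs := by
  intro k xs xy segs _ _
  unfold Spec_dfs
  exact dfs_eq_alt xy xs k segs
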